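-- pv_equiv track=rewrite | github.com/WannaLearning/Demonstrating-Forecasting-and-Explaining-Topic-Evolution | Extract_cs_data.py | get_fos_L3_bornyear
-- ===== SOURCE A (Python) =====
-- def get_fos_L3_bornyear(fos_L3_NoP, acc_nop=10):
--     # 从fos_L3_NoP中抽取所有fos_L3至少发表10篇论文的年份作为主题诞生的年份
--     fos_L3_BY = dict()
--     for fos_L3 in fos_L3_NoP:
--         if len(fos_L3_NoP[fos_L3]) > 0:
--             # 累计发文量超过阈值
--             Ts = sorted(fos_L3_NoP[fos_L3].keys())
--             accNoP = 0
--             for t in Ts: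
--                 accNoP += fos_L3_NoP[fos_L3][t]
--                 # 累计发文量超过10
--                 if accNoP >= acc_nop:
--                     break
--             fos_L3_BY[fos_L3] = t
--     return fos_L3_BY
-- ===== SOURCE B (Python) =====
-- def get_fos_L3_bornyear(fos_L3_NoP, acc_nop=10):
--     # Selection formulation, no sorting and no running accumulator:
--     # a year y qualifies iff the total number of papers in years <= y reaches
--     # the threshold; the born year is the smallest qualifying year, or the
--     # largest year of the topic when the threshold is never reached
--     # (the total count over years <= y equals A's cumulative sum at y).
--     fos_L3_BY = dict()
--     for fos, d in fos_L3_NoP.items():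
--         if d:
--             reached = [y for y in d if sum(v for t, v in d.items() if t <= y) >= acc_nop]
--             fos_L3_BY[fos] = min(reached) if reached else max(d)
--     return fos_L3_BY
-- ===== Notes on version B (the rewrite author's own statement) =====
-- stated objective: alternative
-- what changed: Replaces A's sort-then-scan with a running sum and break by a sort-free selection: a year qualifies iff the total count over all years <= it reaches the threshold, and B takes min(qualifying years) (else max of all years) via list-comprehension filtering and min/max; Pre_ only excludes association lists that repeat a year inside a topic, which represent no Python dict.
import Mathlib
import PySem

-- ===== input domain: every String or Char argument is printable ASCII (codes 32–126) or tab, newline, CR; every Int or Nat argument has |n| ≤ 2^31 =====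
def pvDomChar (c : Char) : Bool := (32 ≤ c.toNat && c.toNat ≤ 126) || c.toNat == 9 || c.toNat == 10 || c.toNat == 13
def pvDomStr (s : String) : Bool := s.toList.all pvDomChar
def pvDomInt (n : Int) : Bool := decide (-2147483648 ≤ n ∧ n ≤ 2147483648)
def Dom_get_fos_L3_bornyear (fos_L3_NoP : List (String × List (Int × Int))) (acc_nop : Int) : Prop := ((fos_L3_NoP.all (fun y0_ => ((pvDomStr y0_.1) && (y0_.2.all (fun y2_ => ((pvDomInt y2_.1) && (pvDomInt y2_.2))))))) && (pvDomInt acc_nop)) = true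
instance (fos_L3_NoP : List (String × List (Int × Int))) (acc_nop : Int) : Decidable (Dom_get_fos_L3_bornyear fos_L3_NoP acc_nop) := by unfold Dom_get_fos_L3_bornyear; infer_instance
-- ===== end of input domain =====

-- B replaces A's sort-then-scan (running sum with break) by a sort-free selection:
-- min of the years whose total count over years ≤ them reaches the threshold, else max year.
-- Objective: alternative (not faster).

-- ===== PORT A =====
-- d[t] for a dict represented as an association list: first match (t is always a key here)
def pvLookup (d : List (Int × Int)) (t : Int) : Int :=
  ((d.find? (fun p => p.1 == t)).map Prod.snd).getD 0

-- 'for t in Ts: accNoP += d[t]; if accNoP >= acc_nop: break' — returns the last t reached (t0 = leftover variable)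
def pvLoopA (d : List (Int × Int)) (acc_nop : Int) : List Int → Int → Int → Int
  | [], _, t0 => t0
  | t :: rest, accNoP, _ =>
      let a := accNoP + pvLookup d t
      if acc_nop ≤ a then t else pvLoopA d acc_nop rest a t

def get_fos_L3_bornyear (fos_L3_NoP : List (String × List (Int × Int))) (acc_nop : Int) : List (String × Int) :=
  (fos_L3_NoP.foldl (fun BY p =>
      if p.2.length > 0 then
        let Ts := PySem.List.sorted (p.2.map Prod.fst) (fun x => x) false
        PySem.Dict.insert BY p.1 (pvLoopA p.2 acc_nop Ts 0 0)
      else BY) (PySem.Dict.mk [])).items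

-- ===== PORT B =====
-- sum(v for t, v in d.items() if t <= y)
def pvSumLe (d : List (Int × Int)) (y : Int) : Int :=
  d.foldl (fun a p => if p.1 ≤ y then a + p.2 else a) 0

-- min(reached) if reached else max(d)   (the trailing 0 is unreachable: d is nonempty there)
def pvBornYearB (d : List (Int × Int)) (acc_nop : Int) : Int :=
  let reached := (d.map Prod.fst).filter (fun y => decide (acc_nop ≤ pvSumLe d y))
  match PySem.List.min? reached (fun x => x) with
  | some m => m
  | none =>
      match PySem.List.max? (d.map Prod.fst) (fun x => x) with
      | some m => m
      | none => 0

def get_fos_L3_bornyear_alt (fos_L3_NoP : List (String × List (Int × Int))) (acc_nop : Int) : List (String × Int) :=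
  (fos_L3_NoP.foldl (fun r p =>
      if p.2.length > 0 then PySem.Dict.insert r p.1 (pvBornYearB p.2 acc_nop) else r)
    (PySem.Dict.mk [])).items

-- ===== PRECONDITION & SPEC =====
-- Pre_ excludes association lists whose inner year lists repeat a year: such lists do not
-- represent any Python dict (dict keys are unique), so A's first-match double counting there
-- is an artefact of the list encoding.
def Pre_get_fos_L3_bornyear (fos_L3_NoP : List (String × List (Int × Int))) (acc_nop : Int) : Prop :=
  ∀ p ∈ fos_L3_NoP, (p.2.map Prod.fst).Nodup
instance (fos_L3_NoP : List (String × List (Int × Int))) (acc_nop : Int) : Decidable (Pre_get_fos_L3_bornyear fos_L3_NoP acc_nop) := by unfold Pre_get_fos_L3_bornyear; infer_instance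

def pvWitness_get_fos_L3_bornyear : (List (String × List (Int × Int))) × Int :=
  ([("a", [(2001, 4), (2000, 3), (2002, 5)]), ("b", [])], 10)

def Spec_get_fos_L3_bornyear (fos_L3_NoP : List (String × List (Int × Int))) (acc_nop : Int) (out : List (String × Int)) : Prop := out = get_fos_L3_bornyear_alt fos_L3_NoP acc_nop
instance (fos_L3_NoP : List (String × List (Int × Int))) (acc_nop : Int) (out : List (String × Int)) : Decidable (Spec_get_fos_L3_bornyear fos_L3_NoP acc_nop out) := by unfold Spec_get_fos_L3_bornyear; infer_instance

-- ===== CLAIM (what is proved, stated in full; the proofs are below) =====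
def Claim_equal_get_fos_L3_bornyear : Prop := ∀ (fos_L3_NoP : List (String × List (Int × Int))) (acc_nop : Int), Dom_get_fos_L3_bornyear fos_L3_NoP acc_nop → Pre_get_fos_L3_bornyear fos_L3_NoP acc_nop → Spec_get_fos_L3_bornyear fos_L3_NoP acc_nop (get_fos_L3_bornyear fos_L3_NoP acc_nop)

-- ===== LEMMAS AND PROOFS =====

-- the running sum of B's generator expression, with an arbitrary initial accumulator
lemma pvSumLe_foldl (d : List (Int × Int)) (y a : Int) :
    d.foldl (fun a p => if p.1 ≤ y then a + p.2 else a) a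
      = a + ((d.filter (fun p => decide (p.1 ≤ y))).map Prod.snd).sum := by
  induction d generalizing a with
  | nil => simp
  | cons p rest ih =>
    by_cases h : p.1 ≤ y
    · rw [List.foldl_cons, if_pos h, ih]
      simp [h]
      ring
    · rw [List.foldl_cons, if_neg h, ih]
      simp [h]

-- with unique keys, the value stored with a key is the first-match lookup
lemma pvLookup_of_mem (d : List (Int × Int)) (hnd : (d.map Prod.fst).Nodup)
    {k v : Int} (hm : (k, v) ∈ d) : pvLookup d k = v := by
  induction d with
  | nil => simp at hm
  | cons p rest ih =>
    simp only [List.map_cons, List.nodup_cons] at hnd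
    rcases List.mem_cons.mp hm with h | h
    · subst h; simp [pvLookup]
    · have hne : ¬ (p.1 == k) = true := by
        simp only [beq_iff_eq]
        intro he
        exact hnd.1 (he ▸ (List.mem_map.mpr ⟨(k, v), h, rfl⟩))
      have := ih hnd.2 h
      simpa [pvLookup, List.find?_cons, hne] using this

-- B's total over years ≤ y, rewritten as a sum of lookups over the key list
lemma pvSumLe_keys (d : List (Int × Int)) (hnd : (d.map Prod.fst).Nodup) (y : Int) :
    pvSumLe d y
      = (((d.map Prod.fst).filter (fun u => decide (u ≤ y))).map (pvLookup d)).sum := by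
  have h1 : pvSumLe d y = ((d.filter (fun p => decide (p.1 ≤ y))).map Prod.snd).sum := by
    unfold pvSumLe; rw [pvSumLe_foldl, zero_add]
  have h2 : (d.filter (fun p => decide (p.1 ≤ y))).map Prod.snd
      = (d.filter (fun p => decide (p.1 ≤ y))).map (fun p => pvLookup d p.1) := by
    refine List.map_congr_left (fun p hp => ?_)
    exact (pvLookup_of_mem d hnd (by simpa using List.mem_of_mem_filter hp)).symm
  have h3 : ((d.map Prod.fst).filter (fun u => decide (u ≤ y)))
      = (d.filter (fun p => decide (p.1 ≤ y))).map Prod.fst := by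
    rw [List.filter_map]; rfl
  rw [h1, h2, h3, List.map_map]; rfl

-- last element of a nonempty list is a member (default-generalised)
lemma pvLastD_mem (l : List Int) (hne : l ≠ []) (dflt : Int) : l.getLastD dflt ∈ l := by
  induction l generalizing dflt with
  | nil => exact absurd rfl hne
  | cons a t ih =>
    cases t with
    | nil => simp
    | cons b u =>
      rw [List.getLastD_cons]
      exact List.mem_cons_of_mem a (ih (by simp) a)

-- in a ≤-sorted list, every element is ≤ the last one
lemma pvLe_lastD (l : List Int) (hpw : l.Pairwise (· ≤ ·)) (dflt : Int) :
    ∀ x ∈ l, x ≤ l.getLastD dflt := by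
  induction l generalizing dflt with
  | nil => intro x hx; simp at hx
  | cons a t ih =>
    intro x hx
    rcases List.pairwise_cons.mp hpw with ⟨ha, hpt⟩
    cases t with
    | nil => simp at hx ⊢; omega
    | cons b u =>
      rw [List.getLastD_cons]
      rcases List.mem_cons.mp hx with h | h
      · exact le_of_eq_of_le h (ha _ (pvLastD_mem (b :: u) (by simp) a))
      · exact ih hpt a x h

-- find? in a ≤-sorted list returns a minimal satisfying element
lemma pvFind?_min (p : Int → Bool) :
    ∀ (l : List Int), l.Pairwise (· ≤ ·) → ∀ {t : Int}, l.find? p = some t →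
      ∀ m ∈ l, p m = true → t ≤ m := by
  intro l
  induction l with
  | nil => intro _ t ht; simp at ht
  | cons a rest ih =>
    intro hpw t ht m hm hpm
    rcases List.pairwise_cons.mp hpw with ⟨ha, hpt⟩
    by_cases hpa : p a = true
    · rw [List.find?_cons_of_pos hpa] at ht
      cases ht
      rcases List.mem_cons.mp hm with h | h
      · omega
      · exact ha m h
    · rw [List.find?_cons_of_neg (by simpa using hpa)] at ht
      rcases List.mem_cons.mp hm with h | h
      · subst h; exact absurd hpm hpa
      · exact ih hpt ht m h hpm

-- characterisation of A's inner loop on a strictly increasing year list whose prefix sums are pvSumLe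
lemma pvLoopA_char (d : List (Int × Int)) (acc_nop : Int) :
    ∀ (Ts : List Int) (a t0 : Int), Ts ≠ [] → Ts.Pairwise (· < ·) →
      (∀ t ∈ Ts, pvSumLe d t = a + ((Ts.filter (fun u => decide (u ≤ t))).map (pvLookup d)).sum) →
      pvLoopA d acc_nop Ts a t0 =
        (match Ts.find? (fun t => decide (acc_nop ≤ pvSumLe d t)) with
         | some t => t
         | none => Ts.getLastD 0) := by
  intro Ts
  induction Ts with
  | nil => intro a t0 h; exact absurd rfl h
  | cons t rest ih =>
    intro a t0 _ hpw hsum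
    rcases List.pairwise_cons.mp hpw with ⟨hlt, hpt⟩
    have hfil : rest.filter (fun u => decide (u ≤ t)) = [] := by
      refine List.filter_eq_nil_iff.mpr (fun u hu => by
        have := hlt u hu; simp; omega)
    have hst : pvSumLe d t = a + pvLookup d t := by
      have h := hsum t (List.mem_cons_self)
      rw [List.filter_cons, if_pos (by simp)] at h
      rw [hfil] at h
      simpa using h
    have hstep : pvLoopA d acc_nop (t :: rest) a t0
        = if acc_nop ≤ a + pvLookup d t then t else pvLoopA d acc_nop rest (a + pvLookup d t) t := rfl
    by_cases hq : acc_nop ≤ pvSumLe d t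
    · rw [hstep, if_pos (by omega), List.find?_cons_of_pos (by simpa using hq)]
    · rw [hstep, if_neg (by omega), List.find?_cons_of_neg (by simpa using hq)]
      cases rest with
      | nil => simp [pvLoopA]
      | cons r rs =>
        have hsum' : ∀ t' ∈ r :: rs, pvSumLe d t'
            = (a + pvLookup d t) + (((r :: rs).filter (fun u => decide (u ≤ t'))).map (pvLookup d)).sum := by
          intro t' ht'
          have h := hsum t' (List.mem_cons_of_mem t ht')
          rw [List.filter_cons, if_pos (by have := hlt t' ht'; simp; omega)] at h
          simp only [List.map_cons, List.sum_cons] at h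
          rw [h]; ring
        rw [ih (a + pvLookup d t) t (by simp) hpt hsum']
        cases hf : (r :: rs).find? (fun u => decide (acc_nop ≤ pvSumLe d u)) with
        | some u => simp
        | none => simp

-- per-topic equality: A's sorted running-sum loop equals B's min/max selection
lemma pvBorn_eq (d : List (Int × Int)) (acc_nop : Int) (hne : d ≠ [])
    (hnd : (d.map Prod.fst).Nodup) :
    pvLoopA d acc_nop (PySem.List.sorted (d.map Prod.fst) (fun x => x) false) 0 0
      = pvBornYearB d acc_nop := by
  set L := d.map Prod.fst with hL
  set Ts := PySem.List.sorted L (fun x => x) false with hTs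
  have hperm : Ts.Perm L := PySem.List.sorted_perm ..
  have hLne : L ≠ [] := by simp [hL, List.map_eq_nil_iff, hne]
  have hTsne : Ts ≠ [] := by
    rw [hTs, Ne, PySem.List.sorted_eq_nil_iff]; exact hLne
  have hpwle : Ts.Pairwise (· ≤ ·) := PySem.List.sorted_pairwise ..
  have hndTs : Ts.Nodup := hperm.nodup_iff.mpr hnd
  have hsum0 : ∀ t ∈ Ts, pvSumLe d t
      = 0 + ((Ts.filter (fun u => decide (u ≤ t))).map (pvLookup d)).sum := by
    intro t _
    rw [zero_add, pvSumLe_keys d hnd t]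
    exact (((hperm.filter _).map (pvLookup d)).sum_eq).symm
  rw [pvLoopA_char d acc_nop Ts 0 0 hTsne
      ((hpwle.and hndTs).imp (fun h => lt_of_le_of_ne h.1 h.2)) hsum0]
  unfold pvBornYearB
  rw [← hL]
  have hpermF : (Ts.filter (fun y => decide (acc_nop ≤ pvSumLe d y))).Perm
      (L.filter (fun y => decide (acc_nop ≤ pvSumLe d y))) := hperm.filter _
  cases hfind : Ts.find? (fun t => decide (acc_nop ≤ pvSumLe d t)) with
  | some t =>
    have htTs : t ∈ Ts := List.mem_of_find?_eq_some hfind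
    have hqt := List.find?_some hfind
    have htF : t ∈ L.filter (fun y => decide (acc_nop ≤ pvSumLe d y)) :=
      hpermF.mem_iff.mp (List.mem_filter.mpr ⟨htTs, hqt⟩)
    cases hmin : PySem.List.min? (L.filter (fun y => decide (acc_nop ≤ pvSumLe d y))) (fun x => x) with
    | none =>
        rw [(PySem.List.min?_eq_none_iff ..).mp hmin] at htF
        simp at htF
    | some m =>
        have hm := PySem.List.min?_mem hmin
        have h1 : m ≤ t := PySem.List.min?_isMin hmin t htF
        have hmTs : m ∈ Ts.filter (fun y => decide (acc_nop ≤ pvSumLe d y)) :=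
          hpermF.symm.mem_iff.mp hm
        have h2 : t ≤ m :=
          pvFind?_min _ Ts hpwle hfind m (List.mem_filter.mp hmTs).1 (List.mem_filter.mp hmTs).2
        simp only [hmin]
        omega
  | none =>
    have hfil : Ts.filter (fun y => decide (acc_nop ≤ pvSumLe d y)) = [] :=
      List.filter_eq_nil_iff.mpr (fun x hx => by
        simpa using List.find?_eq_none.mp hfind x hx)
    have hfilL : L.filter (fun y => decide (acc_nop ≤ pvSumLe d y)) = [] :=
      (hfil ▸ hpermF.symm).eq_nil
    have hmin : PySem.List.min? (L.filter (fun y => decide (acc_nop ≤ pvSumLe d y))) (fun x => x) = none :=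
      (PySem.List.min?_eq_none_iff ..).mpr hfilL
    cases hmax : PySem.List.max? L (fun x => x) with
    | none =>
        exact absurd ((PySem.List.max?_eq_none_iff ..).mp hmax) hLne
    | some m =>
        have hm := PySem.List.max?_mem hmax
        have h1 : Ts.getLastD 0 ≤ m :=
          PySem.List.max?_isMax hmax _ (hperm.mem_iff.mp (pvLastD_mem Ts hTsne 0))
        have h2 : m ≤ Ts.getLastD 0 :=
          pvLe_lastD Ts hpwle 0 m (hperm.mem_iff.mpr hm)
        simp only [hmin]
        omega

-- ===== VERDICT (by name: the statement is the Claim_ definition above) =====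
theorem get_fos_L3_bornyear_spec : Claim_equal_get_fos_L3_bornyear := by
  intro fos acc _ hpre
  unfold Spec_get_fos_L3_bornyear get_fos_L3_bornyear get_fos_L3_bornyear_alt
  congr 1
  refine PySem.List.foldl_congr_mem _ _ _ _ (fun BY p hp => ?_)
  by_cases h : p.2.length > 0
  · simp only [if_pos h]
    congr 1
    exact pvBorn_eq p.2 acc (List.ne_nil_of_length_pos h) (hpre p hp)
  · simp [if_neg h]
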